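-- pv_equiv track=rewrite | github.com/Smarandii/minitrip.online-bot | bot.py | food
-- ===== SOURCE A (Python) =====
-- def food(x):
--     y = ""
--     k1 = 0
--     k2 = 0
--     m = 0
--     for i in range(len(x)):
--         if x[i] == ",":
--             m = m + 1
--             k2 = i
--             if m == 5:
--                 k1 = i
--     for i in range(k1 + 1, k2):
--         y = y + x[i]
--     return y
-- ===== SOURCE B (Python) =====
-- def food(x):
--     pos = [i for i, c in enumerate(x) if c == ","]
--     k1 = pos[4] if len(pos) >= 5 else 0
--     k2 = pos[-1] if pos else 0
--     return "".join(x[k1 + 1:k2])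
-- ===== Notes on version B (the rewrite author's own statement) =====
-- stated objective: simpler
-- what changed: Replaces A's running counter/last-index state machine plus a char-by-char concatenation loop with a comma-position table built once and a single slice (reproducing A's 0-defaults when there are fewer than 5 commas or no comma).
import Mathlib
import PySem

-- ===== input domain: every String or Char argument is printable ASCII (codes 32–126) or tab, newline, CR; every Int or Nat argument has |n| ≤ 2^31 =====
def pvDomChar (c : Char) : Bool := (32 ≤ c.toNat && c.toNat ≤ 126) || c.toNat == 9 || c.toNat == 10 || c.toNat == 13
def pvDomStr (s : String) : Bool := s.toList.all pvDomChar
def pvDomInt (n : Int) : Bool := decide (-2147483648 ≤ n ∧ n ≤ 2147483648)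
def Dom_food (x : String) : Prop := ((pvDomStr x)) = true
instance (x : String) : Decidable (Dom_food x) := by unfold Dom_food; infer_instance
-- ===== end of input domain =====

-- B replaces A's running counter/last-index state machine and char-by-char concatenation
-- with a comma-position table built once and a single slice (objective: simpler).

-- ===== PORT A =====
-- first loop of A: for i in range(len(x)): if x[i] == "," … ; state (k1, k2, m)
def foodScan : List Char → Int → Int × Int × Int → Int × Int × Int
  | [], _, st => st
  | c :: rest, i, (k1, k2, m) =>
    if c = ',' then
      let m' := m + 1
      let k2' := i
      let k1' := if m' = 5 then i else k1
      foodScan rest (i + 1) (k1', k2', m')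
    else
      foodScan rest (i + 1) (k1, k2, m)

def food (x : String) : String :=
  let cs := x.toList
  let st := foodScan cs 0 (0, 0, 0)
  let k1 := st.1
  let k2 := st.2.1
  -- second loop: for i in range(k1 + 1, k2): y = y + x[i]
  (PySem.List.pyRange (k1 + 1) k2 1).foldl
    (fun y i => y.push (PySem.List.pyGetD cs i ' ')) ""

-- ===== PORT B =====
def food_alt (x : String) : String :=
  let cs := x.toList
  let pos := (PySem.List.enumerate cs).filterMap (fun p => if p.2 = ',' then some p.1 else none)
  let k1 := if 5 ≤ pos.length then pos.getD 4 0 else 0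
  let k2 := pos.getLast?.getD 0
  String.ofList (PySem.List.slice cs (some (k1 + 1)) (some k2))

-- ===== PRECONDITION & SPEC =====
def Spec_food (x : String) (out : String) : Prop := out = food_alt x
instance (x : String) (out : String) : Decidable (Spec_food x out) := by unfold Spec_food; infer_instance

-- ===== CLAIM (what is proved, stated in full; the proofs are below) =====
def Claim_equal_food : Prop := ∀ (x : String), Dom_food x → Spec_food x (food x)

-- ===== LEMMAS AND PROOFS =====

/-- The comma positions of `cs`, indices starting at `i`. -/
def cposFrom : Int → List Char → List Int
  | _, [] => []
  | i, c :: rest => if c = ',' then i :: cposFrom (i + 1) rest else cposFrom (i + 1) rest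

/-- B's derived state from a position list. -/
def gstate (P : List Int) : Int × Int × Int :=
  ((if 5 ≤ P.length then P.getD 4 0 else 0), P.getLast?.getD 0, (P.length : Int))

lemma gstate_append_singleton (P : List Int) (i : Int) :
    gstate (P ++ [i]) =
      ((if (P.length : Int) + 1 = 5 then i else (gstate P).1), i, (P.length : Int) + 1) := by
  unfold gstate
  refine Prod.ext ?_ (Prod.ext ?_ ?_)
  · simp only
    rcases lt_trichotomy P.length 4 with h | h | h
    · rw [if_neg (by simp; omega), if_neg (by push_cast; omega), if_neg (by omega)]
    · rw [if_pos (by simp; omega), if_pos (by push_cast; omega)]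
      simp only [List.getD]
      rw [List.getElem?_append_right (by omega)]
      simp [h]
    · rw [if_pos (by simp; omega), if_neg (by push_cast; omega), if_pos (by omega)]
      have h4 : 4 < P.length := h
      simp [List.getD, List.getElem?_append_left h4]
  · simp
  · simp

lemma foodScan_gstate (cs : List Char) : ∀ (i : Int) (P : List Int),
    foodScan cs i (gstate P) = gstate (P ++ cposFrom i cs) := by
  induction cs with
  | nil => intro i P; simp [foodScan, cposFrom]
  | cons c rest ih =>
    intro i P
    by_cases hc : c = ','
    · have hstep :
        foodScan (c :: rest) i (gstate P) = foodScan rest (i + 1) (gstate (P ++ [i])) := by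
      
        rw [gstate_append_singleton]
        simp only [foodScan, gstate, if_pos hc]
      rw [hstep, ih (i + 1) (P ++ [i])]
      simp [cposFrom, hc]
    · have hstep :
        foodScan (c :: rest) i (gstate P) = foodScan rest (i + 1) (gstate P) := by
        simp only [foodScan, gstate, if_neg hc]
      rw [hstep, ih (i + 1) P]
      simp [cposFrom, hc]

lemma filterMap_enumerate_eq_cposFrom (cs : List Char) : ∀ (s : Int),
    (PySem.List.enumerate cs s).filterMap (fun p => if p.2 = ',' then some p.1 else none)
      = cposFrom s cs := by
  induction cs with
  | nil => intro s; simp [PySem.List.enumerate, cposFrom]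
  | cons c rest ih =>
    intro s
    rw [PySem.List.enumerate_cons]
    by_cases hc : c = ',' <;> simp [cposFrom, hc, ih (s + 1)]

lemma cposFrom_bounds (cs : List Char) : ∀ (i j : Int),
    j ∈ cposFrom i cs → i ≤ j ∧ j < i + cs.length := by
  induction cs with
  | nil => intro i j h; simp [cposFrom] at h
  | cons c rest ih =>
    intro i j h
    simp only [cposFrom] at h
    split_ifs at h with hc
    · rcases List.mem_cons.mp h with rfl | h
      · simp
      · have := ih (i + 1) j h; simp at *; omega
    · have := ih (i + 1) j h; simp at *; omega

lemma foldl_push_eq_ofList (l : List Char) : ∀ (s : String),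
    l.foldl (fun y c => y.push c) s = s ++ String.ofList l := by
  induction l with
  | nil => intro s; apply String.toList_injective; simp
  | cons c rest ih =>
    intro s
    simp only [List.foldl_cons, ih]
    apply String.toList_injective
    simp

lemma food_eq (x : String) : food x = food_alt x := by
  unfold food food_alt
  dsimp only
  set cs := x.toList with hcs
  rw [filterMap_enumerate_eq_cposFrom cs 0]
  have hscan : foodScan cs 0 (0, 0, 0) = gstate (cposFrom 0 cs) := by
    have := foodScan_gstate cs 0 []
    simpa [gstate] using this
  rw [hscan]
  set P := cposFrom 0 cs with hP
  have hbounds : ∀ j ∈ P, 0 ≤ j ∧ j < (cs.length : Int) := by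
    intro j hj
    have := cposFrom_bounds cs 0 j hj
    omega
  set k1 := (gstate P).1 with hk1
  set k2 := (gstate P).2.1 with hk2
  have hk1' : k1 = if 5 ≤ P.length then P.getD 4 0 else 0 := rfl
  have hk2' : k2 = P.getLast?.getD 0 := rfl
  rw [← hk1', ← hk2']
  have hk2nn : 0 ≤ k2 ∧ k2 ≤ (cs.length : Int) := by
    rw [hk2']
    cases hcase : P.getLast? with
    | none => simp
    | some j =>
      have hj : j ∈ P := List.mem_of_getLast? hcase
      have := hbounds j hj
      simp; omega
  have hk1nn : 0 ≤ k1 := by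
    rw [hk1']
    split_ifs with h
    · have h4 : 4 < P.length := by omega
      have hg : P.getD 4 0 = P[4] := List.getD_eq_getElem P 0 h4
      rw [hg]
      exact (hbounds _ (List.getElem_mem h4)).1
    · omega
  have hlen2 : ((cs.take k2.toNat).length : Int) = k2 := by
    simp [List.length_take]; omega
  have hfold :
      (PySem.List.pyRange (k1 + 1) k2 1).foldl
        (fun y i => y.push (PySem.List.pyGetD cs i ' ')) ""
      = (PySem.List.pyRange (k1 + 1) k2 1).foldl
        (fun y i => y.push (PySem.List.pyGetD (cs.take k2.toNat) i ' ')) "" := by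
    apply PySem.List.foldl_congr_mem
    intro y i hi
    obtain ⟨h1, h2⟩ := PySem.List.mem_pyRange_one.mp hi
    have h0 : (0 : Int) ≤ i := by omega
    have hlt : i < (cs.length : Int) := by omega
    rw [PySem.List.pyGetD_eq_getElem cs ' ' h0 hlt]
    rw [PySem.List.pyGetD_eq_getElem (cs.take k2.toNat) ' ' h0 (by rw [hlen2]; omega)]
    rw [List.getElem_take]
  rw [hfold]
  have hrange : PySem.List.pyRange (k1 + 1) k2 1
      = PySem.List.pyRange (k1 + 1) (PySem.List.len (cs.take k2.toNat)) 1 := by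
    rw [PySem.List.len_eq, hlen2]
  rw [hrange]
  rw [PySem.List.foldl_pyRange_pyGetD (cs.take k2.toNat) ' '
        (fun (y : String) (c : Char) => y.push c) "" (by omega)]
  rw [foldl_push_eq_ofList]
  rw [PySem.List.slice_toNat cs (by omega) hk2nn.1]
  rw [List.drop_take]
  apply String.toList_injective
  simp

-- ===== VERDICT (by name: the statement is the Claim_ definition above) =====
theorem food_spec : Claim_equal_food := by
  intro x _
  unfold Spec_food
  exact food_eq x
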